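-- pv_equiv track=rewrite | github.com/carolinarodrigues21/BancodeAreia | sandpile2.py | verifica
-- ===== SOURCE A (Python) =====
-- def verifica(z,zc,L):
--     contadorDes = 0
--     avalanche = []
--
--     for i in range(0,L):
--         if z[i]>= zc[i]:
--             contadorDes += 1
--             avalanche.append(1)
--         else:
--             contadorDes += 0
--             avalanche.append(0)
--
--     contadorAva = 0
--     for j in range(0,len(avalanche)-1):
--         if avalanche[j]==1 and avalanche[j] == avalanche[j+1] :
--             contadorAva += 1
--
--     if contadorDes != 0:
--         return True, contadorAva
--     else:
--         return False, contadorAva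
-- ===== SOURCE B (Python) =====
-- def verifica(z, zc, L):
--     # One pass: keep a toppling counter and whether the previous site toppled;
--     # never build the avalanche list.
--     toppling = 0
--     pairs = 0
--     prev = False
--     for i in range(L):
--         t = z[i] >= zc[i]
--         if t:
--             toppling += 1
--             if prev:
--                 pairs += 1
--         prev = t
--     return toppling != 0, pairs
-- ===== Notes on version B (the rewrite author's own statement) =====
-- stated objective: simpler
-- what changed: single loop maintaining a toppling counter and a previous-site-toppled flag, instead of materialising the 0/1 avalanche list and rescanning it with a second indexed loop
import Mathlib
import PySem

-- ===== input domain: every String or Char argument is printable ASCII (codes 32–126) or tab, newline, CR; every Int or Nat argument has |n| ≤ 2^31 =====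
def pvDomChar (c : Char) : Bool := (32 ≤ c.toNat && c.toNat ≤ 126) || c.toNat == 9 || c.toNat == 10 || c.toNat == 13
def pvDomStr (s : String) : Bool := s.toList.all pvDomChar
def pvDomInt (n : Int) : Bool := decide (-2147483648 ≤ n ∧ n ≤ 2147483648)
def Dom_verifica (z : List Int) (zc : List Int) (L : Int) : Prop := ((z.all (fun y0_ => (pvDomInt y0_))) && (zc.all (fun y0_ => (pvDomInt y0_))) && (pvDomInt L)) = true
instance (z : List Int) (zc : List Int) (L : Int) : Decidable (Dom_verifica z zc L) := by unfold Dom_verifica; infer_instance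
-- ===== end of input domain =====

-- B replaces A's build-a-0/1-list-then-rescan with one pass keeping a counter and a previous-site flag (objective: simpler).

-- ===== PORT A =====
def verifica (z : List Int) (zc : List Int) (L : Int) : Bool × Int :=
  let s := (PySem.List.pyRange 0 L 1).foldl
    (fun (st : Int × List Int) i =>
      if PySem.List.pyGetD z i 0 ≥ PySem.List.pyGetD zc i 0 then
        (st.1 + 1, st.2 ++ [(1 : Int)])
      else
        (st.1 + 0, st.2 ++ [(0 : Int)]))
    ((0 : Int), ([] : List Int))
  let contadorDes := s.1
  let avalanche := s.2
  let contadorAva := (PySem.List.pyRange 0 ((avalanche.length : Int) - 1) 1).foldl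
    (fun (c : Int) j =>
      if PySem.List.pyGetD avalanche j 0 = 1 ∧
         PySem.List.pyGetD avalanche j 0 = PySem.List.pyGetD avalanche (j + 1) 0 then
        c + 1
      else c)
    (0 : Int)
  if contadorDes ≠ 0 then (true, contadorAva) else (false, contadorAva)

-- ===== PORT B =====
def verifica_alt (z : List Int) (zc : List Int) (L : Int) : Bool × Int :=
  let s := (PySem.List.pyRange 0 L 1).foldl
    (fun (st : Int × Int × Bool) i =>
      let t : Bool := decide (PySem.List.pyGetD z i 0 ≥ PySem.List.pyGetD zc i 0)
      (st.1 + (if t then 1 else 0), st.2.1 + (if t && st.2.2 then 1 else 0), t))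
    ((0 : Int), (0 : Int), false)
  (decide (s.1 ≠ 0), s.2.1)

-- ===== PRECONDITION & SPEC =====
-- Python A raises IndexError iff some index in range(L) is out of range of z or zc; since
-- lengths are nonnegative this is exactly L ≤ len(z) ∧ L ≤ len(zc).
def Pre_verifica (z : List Int) (zc : List Int) (L : Int) : Prop :=
  L ≤ (z.length : Int) ∧ L ≤ (zc.length : Int)
instance (z : List Int) (zc : List Int) (L : Int) : Decidable (Pre_verifica z zc L) := by
  unfold Pre_verifica; infer_instance
def pvWitness_verifica : List Int × List Int × Int := ([3, 1, 2], [2, 2, 2], 3)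

def Spec_verifica (z : List Int) (zc : List Int) (L : Int) (out : Bool × Int) : Prop := out = verifica_alt z zc L
instance (z : List Int) (zc : List Int) (L : Int) (out : Bool × Int) : Decidable (Spec_verifica z zc L out) := by unfold Spec_verifica; infer_instance

-- ===== CLAIM (what is proved, stated in full; the proofs are below) =====
def Claim_equal_verifica : Prop := ∀ (z : List Int) (zc : List Int) (L : Int), Dom_verifica z zc L → Pre_verifica z zc L → Spec_verifica z zc L (verifica z zc L)

-- ===== LEMMAS AND PROOFS =====

-- the flag "site i topples", its 0/1 encoding, A's avalanche list after n steps, B's prev flag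
def pvT (z zc : List Int) (i : Int) : Bool :=
  decide (PySem.List.pyGetD z i 0 ≥ PySem.List.pyGetD zc i 0)
def pvG (z zc : List Int) (i : Int) : Int := if pvT z zc i then 1 else 0
def pvAv (z zc : List Int) (n : Nat) : List Int :=
  (List.range n).map (fun k => pvG z zc (k : Int))
def pvPrev (z zc : List Int) : Nat → Bool
  | 0 => false
  | m + 1 => pvT z zc (m : Int)

-- A's second loop as a function of the avalanche list
def pvPC (av : List Int) : Int :=
  (PySem.List.pyRange 0 ((av.length : Int) - 1) 1).foldl
    (fun (c : Int) j =>
      if PySem.List.pyGetD av j 0 = 1 ∧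
         PySem.List.pyGetD av j 0 = PySem.List.pyGetD av (j + 1) 0 then
        c + 1
      else c)
    (0 : Int)

lemma pvGetD_append_left (ys : List Int) (x : Int) (j : Int) (h0 : 0 ≤ j)
    (h : j < (ys.length : Int)) :
    PySem.List.pyGetD (ys ++ [x]) j 0 = PySem.List.pyGetD ys j 0 := by
  rw [PySem.List.pyGetD_eq_getElem (ys ++ [x]) 0 h0 (by simp; omega),
      PySem.List.pyGetD_eq_getElem ys 0 h0 h]
  exact List.getElem_append_left (by omega)

lemma pvAv_length (z zc : List Int) (n : Nat) : (pvAv z zc n).length = n := by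
  simp [pvAv]

lemma pvAv_succ (z zc : List Int) (n : Nat) :
    pvAv z zc (n + 1) = pvAv z zc n ++ [pvG z zc (n : Int)] := by
  simp [pvAv, List.range_succ]

lemma pvPC_append (ys : List Int) (x : Int) :
    pvPC (ys ++ [x]) = pvPC ys +
      (if ys ≠ [] ∧ ys.getD (ys.length - 1) 0 = 1 ∧ ys.getD (ys.length - 1) 0 = x
       then 1 else 0) := by
  rcases eq_or_ne ys [] with rfl | hne
  · simp [pvPC, PySem.List.pyRange_one_eq_nil (by norm_num : (0 : Int) - 1 ≤ 0)]
  · have hm : 1 ≤ ys.length := List.length_pos_iff.mpr hne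
    have hn1 : ((ys.length - 1 : Nat) : Int) = (ys.length : Int) - 1 := by omega
    have hcast : ((ys ++ [x]).length : Int) - 1 = ((ys.length - 1 : Nat) : Int) + 1 := by
      simp; omega
    unfold pvPC
    rw [hcast, PySem.List.pyRange_one_succ_right (Int.natCast_nonneg _), List.foldl_append]
    have hpre :
        List.foldl
          (fun (c : Int) j =>
            if PySem.List.pyGetD (ys ++ [x]) j 0 = 1 ∧
               PySem.List.pyGetD (ys ++ [x]) j 0 = PySem.List.pyGetD (ys ++ [x]) (j + 1) 0
            then c + 1 else c)
          0 (PySem.List.pyRange 0 ((ys.length - 1 : Nat) : Int) 1)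
        = List.foldl
          (fun (c : Int) j =>
            if PySem.List.pyGetD ys j 0 = 1 ∧
               PySem.List.pyGetD ys j 0 = PySem.List.pyGetD ys (j + 1) 0
            then c + 1 else c)
          0 (PySem.List.pyRange 0 ((ys.length - 1 : Nat) : Int) 1) := by
      refine PySem.List.foldl_congr_mem _ _ _ _ ?_
      intro acc j hj
      have hj' := (PySem.List.mem_pyRange_one).mp hj
      rw [pvGetD_append_left ys x j hj'.1 (by omega),
          pvGetD_append_left ys x (j + 1) (by omega) (by omega)]
    rw [hpre, List.foldl_cons, List.foldl_nil]
    have h1 : PySem.List.pyGetD (ys ++ [x]) ((ys.length - 1 : Nat) : Int) 0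
        = ys.getD (ys.length - 1) 0 := by
      rw [pvGetD_append_left ys x _ (Int.natCast_nonneg _) (by omega),
          PySem.List.pyGetD_natCast]
    have h2 : PySem.List.pyGetD (ys ++ [x]) (((ys.length - 1 : Nat) : Int) + 1) 0 = x := by
      rw [show ((ys.length - 1 : Nat) : Int) + 1 = ((ys.length : Nat) : Int) by omega,
          PySem.List.pyGetD_natCast]
      simp [List.getD_eq_getElem?_getD, List.getElem?_append_right (le_refl ys.length)]
    rw [h1, h2, hn1]
    simp only [hne, ne_eq, not_false_iff, true_and]
    split_ifs <;> ring

lemma pvA_loop (z zc : List Int) (n : Nat) :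
    (PySem.List.pyRange 0 (n : Int) 1).foldl
      (fun (st : Int × List Int) i =>
        if PySem.List.pyGetD z i 0 ≥ PySem.List.pyGetD zc i 0 then
          (st.1 + 1, st.2 ++ [(1 : Int)])
        else
          (st.1 + 0, st.2 ++ [(0 : Int)]))
      ((0 : Int), ([] : List Int))
    = ((pvAv z zc n).sum, pvAv z zc n) := by
  induction n with
  | zero => simp [pvAv, PySem.List.pyRange_one_eq_nil (le_refl (0 : Int))]
  | succ m ih =>
    rw [show ((m + 1 : Nat) : Int) = (m : Int) + 1 by push_cast; ring,
        PySem.List.pyRange_one_succ_right (Int.natCast_nonneg _), List.foldl_append, ih,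
        List.foldl_cons, List.foldl_nil, pvAv_succ, List.sum_append]
    by_cases h : (zc[m]?.getD (0 : Int)) ≤ z[m]?.getD 0 <;>
      simp [h, pvG, pvT]

lemma pvB_loop (z zc : List Int) (n : Nat) :
    (PySem.List.pyRange 0 (n : Int) 1).foldl
      (fun (st : Int × Int × Bool) i =>
        let t : Bool := decide (PySem.List.pyGetD z i 0 ≥ PySem.List.pyGetD zc i 0)
        (st.1 + (if t then 1 else 0), st.2.1 + (if t && st.2.2 then 1 else 0), t))
      ((0 : Int), (0 : Int), false)
    = ((pvAv z zc n).sum, pvPC (pvAv z zc n), pvPrev z zc n) := by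
  induction n with
  | zero =>
    simp [pvAv, pvPC, pvPrev, PySem.List.pyRange_one_eq_nil (le_refl (0 : Int)),
      PySem.List.pyRange_one_eq_nil (by norm_num : (0 : Int) - 1 ≤ 0)]
  | succ m ih =>
    rw [show ((m + 1 : Nat) : Int) = (m : Int) + 1 by push_cast; ring,
        PySem.List.pyRange_one_succ_right (Int.natCast_nonneg _), List.foldl_append, ih,
        List.foldl_cons, List.foldl_nil, pvAv_succ, List.sum_append,
        pvPC_append]
    cases m with
    | zero =>
      by_cases h : (zc[(0 : Nat)]?.getD (0 : Int)) ≤ z[(0 : Nat)]?.getD 0 <;>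
        simp [h, pvAv, pvG, pvT, pvPrev, pvPC,
          PySem.List.pyRange_one_eq_nil (by norm_num : (0 : Int) - 1 ≤ 0)]
    | succ k =>
      have hne : pvAv z zc (k + 1) ≠ [] :=
        List.ne_nil_of_length_pos (by rw [pvAv_length]; omega)
      have hget : (pvAv z zc (k + 1)).getD ((pvAv z zc (k + 1)).length - 1) 0
          = pvG z zc (k : Int) := by
        rw [pvAv_length, Nat.add_sub_cancel, pvAv_succ,
          List.getD_append_right _ _ _ _ (le_of_eq (pvAv_length z zc k))]
        simp [pvAv_length]
      have hc : ((k + 1 : Nat) : Int) = (k : Int) + 1 := by push_cast; ring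
      simp only [hne, ne_eq, not_false_iff, true_and, hget, pvPrev, hc]
      by_cases h1 : (zc[k]?.getD (0 : Int)) ≤ z[k]?.getD 0 <;>
        by_cases h2 : (zc[k + 1]?.getD (0 : Int)) ≤ z[k + 1]?.getD 0 <;>
        simp [h1, h2, pvG, pvT, hc]

lemma verifica_eq_alt (z zc : List Int) (L : Int) :
    verifica z zc L = verifica_alt z zc L := by
  by_cases hL : L ≤ 0
  · have hr : PySem.List.pyRange 0 L 1 = [] := PySem.List.pyRange_one_eq_nil hL
    simp only [verifica, verifica_alt, hr, List.foldl_nil, List.length_nil]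
    rw [PySem.List.pyRange_one_eq_nil (by norm_num : ((0 : Nat) : Int) - 1 ≤ 0)]
    decide
  · obtain ⟨n, rfl⟩ : ∃ n : Nat, L = (n : Int) :=
      ⟨L.toNat, (Int.toNat_of_nonneg (by omega)).symm⟩
    simp only [verifica, verifica_alt, pvA_loop, pvB_loop]
    by_cases h : (pvAv z zc n).sum ≠ 0 <;> simp [h, pvPC]

-- ===== VERDICT (by name: the statement is the Claim_ definition above) =====
theorem verifica_spec : Claim_equal_verifica := by
  intro z zc L _ _
  unfold Spec_verifica
  exact verifica_eq_alt z zc L
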